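-- pv_equiv track=rewrite | github.com/RYOMA-SyY/TINY-PROJECTS | Py/dict/ex6.py | compter2
-- ===== SOURCE A (Python) =====
-- def compter2(arr):
--     dics = {}
--     exclus =".,;!?"
--     for char in arr:
--         if char not in exclus:
--             if char in dics:
--                 dics[char] += 1
--             else:
--                 dics[char] = 1
--
--
--     return dics
-- ===== SOURCE B (Python) =====
-- def compter2(arr):
--     # Deduplicate to the distinct characters in first-occurrence order, drop the
--     # excluded punctuation, and key each survivor to its total str.count tally.
--     exclus = ".,;!?"
--     return {ch: arr.count(ch) for ch in dict.fromkeys(arr) if ch not in exclus}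
-- ===== Notes on version B (the rewrite author's own statement) =====
-- stated objective: faster
-- what changed: A tallies incrementally in Python (guard each char, branch on key presence, increment); B deduplicates the characters (dict.fromkeys) and keys each non-excluded character directly to its total count from a C-level str.count scan, removing the per-character Python-level dict update.
import Mathlib
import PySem

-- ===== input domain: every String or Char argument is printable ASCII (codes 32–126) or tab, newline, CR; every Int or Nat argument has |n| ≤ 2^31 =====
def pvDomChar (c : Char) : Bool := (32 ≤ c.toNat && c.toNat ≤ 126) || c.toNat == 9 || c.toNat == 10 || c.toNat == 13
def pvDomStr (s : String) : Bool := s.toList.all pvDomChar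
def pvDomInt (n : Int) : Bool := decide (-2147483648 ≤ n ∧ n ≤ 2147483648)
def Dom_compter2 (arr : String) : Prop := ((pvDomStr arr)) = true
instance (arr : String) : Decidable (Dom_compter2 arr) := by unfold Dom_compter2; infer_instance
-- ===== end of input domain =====

-- B replaces A's incremental guarded tally with a dict comprehension over the deduplicated
-- characters, keying each surviving character to its total str.count tally; measured faster (constant-factor: C-level scans).


-- ===== PORT A =====
-- literal transliteration: skip chars of ".,;!?", otherwise increment if present else set to 1
def compter2 (arr : String) : List (String × Int) :=
  (arr.toList.foldl
    (fun dics char =>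
      if (".,;!?".toList.contains char) = false then
        if dics.contains (String.singleton char) then
          dics.insert (String.singleton char) (dics.getD (String.singleton char) 0 + 1)
        else
          dics.insert (String.singleton char) 1
      else dics)
    (PySem.Dict.empty : PySem.Dict String Int)).items

-- ===== PORT B =====
-- dict comprehension: for each distinct ch of dict.fromkeys(arr) (= PySem.List.dedup)
-- not in ".,;!?", bind ch ↦ arr.count(ch)
def compter2_alt (arr : String) : List (String × Int) :=
  ((PySem.List.dedup arr.toList).foldl
    (fun d ch =>
      if (".,;!?".toList.contains ch) = false then
        d.insert (String.singleton ch) ((PySem.Str.count arr (String.singleton ch) : Int))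
      else d)
    (PySem.Dict.empty : PySem.Dict String Int)).items

-- ===== PRECONDITION & SPEC =====
def Spec_compter2 (arr : String) (out : List (String × Int)) : Prop := out = compter2_alt arr
instance (arr : String) (out : List (String × Int)) : Decidable (Spec_compter2 arr out) := by unfold Spec_compter2; infer_instance

-- ===== CLAIM (what is proved, stated in full; the proofs are below) =====
def Claim_equal_compter2 : Prop := ∀ (arr : String), Dom_compter2 arr → Spec_compter2 arr (compter2 arr)

-- ===== LEMMAS AND PROOFS =====

-- s.count(ch) for a single character is List.count (bridge into PySem.Chars.count's fuel loop)
theorem count_go_singleton (c : Char) (l : List Char) : ∀ (fuel acc : Nat), l.length ≤ fuel →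
    PySem.Chars.count.go [c] fuel l acc = acc + l.count c := by
  induction l with
  | nil =>
    intro fuel acc _
    cases fuel <;> simp [PySem.Chars.count.go]
  | cons h t ih =>
    intro fuel acc hf
    cases fuel with
    | zero => simp at hf
    | succ f =>
      have ht : t.length ≤ f := by simpa using hf
      by_cases hc : c = h
      · subst hc
        simp [PySem.Chars.count.go, List.isPrefixOf, ih f (acc + 1) ht]
        omega
      · simp [PySem.Chars.count.go, List.isPrefixOf, beq_iff_eq, hc,
              ih f acc ht, Ne.symm hc]

theorem count_singleton (s : List Char) (c : Char) :
    PySem.Chars.count s [c] = s.count c := by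
  simpa using count_go_singleton c s s.length 0 le_rfl

theorem singleton_injective : Function.Injective String.singleton := by
  intro a b hab
  simpa using congrArg String.toList hab

-- a guarded fold is the fold over the filtered list
theorem foldl_guard {α β : Type} (q : α → Bool) (f : β → α → β) (l : List α) (a : β) :
    l.foldl (fun d c => if q c = false then f d c else d) a
      = (l.filter (fun c => !q c)).foldl f a := by
  induction l generalizing a with
  | nil => rfl
  | cons h t ih =>
    by_cases hq : q h = false
    · simp [hq, ih]
    · have : q h = true := by simpa using hq
      simp [this, ih]

-- A's contains-branch is the unconditional increment (an absent key reads as 0)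
theorem branch_eq (d : PySem.Dict String Int) (s : String) :
    (if d.contains s then d.insert s (d.getD s 0 + 1) else d.insert s 1)
      = d.insert s (d.getD s 0 + 1) := by
  by_cases h : d.contains s = true
  · simp [h]
  · have hf : d.contains s = false := by simpa using h
    simp [h, PySem.Dict.getD_of_not_contains _ _ hf]

-- a fold whose inserted value depends only on the key: final value at any key hit is v k
theorem getD_fold_keyval (v : Char → Int) (ys : List Char) : ∀ (d : PySem.Dict String Int) (k : Char),
    (ys.foldl (fun d c => d.insert (String.singleton c) (v c)) d).getD (String.singleton k) 0
      = if k ∈ ys then v k else d.getD (String.singleton k) 0 := by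
  induction ys with
  | nil => intro d k; simp
  | cons c t ih =>
    intro d k
    rw [List.foldl_cons, ih]
    by_cases hkt : k ∈ t
    · simp [hkt]
    · rw [PySem.Dict.getD_insert]
      by_cases hkc : k = c
      · subst hkc; simp [hkt]
      · simp [hkt, hkc]
        exact fun h => absurd (singleton_injective h) hkc

-- set(map f l) is map f (set l) for injective f
theorem ofList_map_inj {α β : Type} [BEq α] [LawfulBEq α] [BEq β] [LawfulBEq β]
    (f : α → β) (hf : Function.Injective f) (l : List α) :
    PySem.Set.ofList (l.map f) = (PySem.Set.ofList l).map f := by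
  induction l with
  | nil => simp
  | cons x t ih =>
    rw [List.map_cons, PySem.Set.ofList_cons, PySem.Set.ofList_cons, ih]
    simp only [PySem.Set.discard, List.map_cons]
    congr 1
    rw [List.filter_map]
    congr 1
    refine List.filter_congr (fun y _ => ?_)
    simp [Function.comp, hf.eq_iff]

-- set(filter q l) is filter q (set l)
theorem ofList_filter {α : Type} [BEq α] [LawfulBEq α] (q : α → Bool) (l : List α) :
    PySem.Set.ofList (l.filter q) = (PySem.Set.ofList l).filter q := by
  induction l with
  | nil => simp
  | cons x t ih =>
    by_cases hq : q x = true
    · rw [List.filter_cons_of_pos hq, PySem.Set.ofList_cons, PySem.Set.ofList_cons, ih,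
          List.filter_cons_of_pos hq]
      simp only [PySem.Set.discard]
      rw [List.filter_filter, List.filter_filter]
      exact congrArg _ (List.filter_congr (fun a _ => by rw [Bool.and_comm]))
    · have hq' : q x = false := by simpa using hq
      rw [List.filter_cons_of_neg (by simp [hq']), PySem.Set.ofList_cons, ih,
          List.filter_cons_of_neg (by simp [hq'])]
      simp only [PySem.Set.discard]
      rw [List.filter_filter]
      refine (List.filter_congr (fun a _ => ?_)).symm
      by_cases hax : a = x
      · subst hax; simp [hq']
      · simp [hax]

-- ===== VERDICT (by name: the statement is the Claim_ definition above) =====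
theorem compter2_spec : Claim_equal_compter2 := by
  intro arr _
  show compter2 arr = compter2_alt arr
  unfold compter2 compter2_alt
  -- reduce A's branch to the unconditional increment
  have hA : (fun (dics : PySem.Dict String Int) char =>
        if (".,;!?".toList.contains char) = false then
          if dics.contains (String.singleton char) then
            dics.insert (String.singleton char) (dics.getD (String.singleton char) 0 + 1)
          else dics.insert (String.singleton char) 1
        else dics)
      = (fun (dics : PySem.Dict String Int) char =>
        if (".,;!?".toList.contains char) = false then
          dics.insert (String.singleton char) (dics.getD (String.singleton char) 0 + 1)
        else dics) := by
    funext d c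
    by_cases h : (".,;!?".toList.contains c) = false
    · simp only [h, if_true, branch_eq]
    · rw [if_neg h, if_neg h]
  rw [hA]
  set q : Char → Bool := fun c => ".,;!?".toList.contains c with hq
  rw [foldl_guard q, foldl_guard q]
  set xs := arr.toList with hxs
  set ys := xs.filter (fun c => !q c) with hys
  set ws := (PySem.List.dedup xs).filter (fun c => !q c) with hws
  set zs := ys.map String.singleton with hzs
  -- A side: the increment fold over ys is Counter(zs)
  have hAside : ys.foldl
      (fun (d : PySem.Dict String Int) c => d.insert (String.singleton c) (d.getD (String.singleton c) 0 + 1))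
      PySem.Dict.empty = PySem.Dict.counter zs := by
    rw [hzs, ← PySem.Dict.foldl_insert_getD_add_one_eq_counter, List.foldl_map]
  rw [hAside, PySem.Dict.items_counter]
  -- the first-occurrence key lists of the two sides coincide
  have hwsnodup : (ws.map String.singleton).Nodup :=
    List.Nodup.map singleton_injective (List.Nodup.filter _ (PySem.List.nodup_dedup xs))
  have hsets : PySem.Set.ofList zs = ws.map String.singleton := by
    rw [hzs, ofList_map_inj _ singleton_injective, hys, ofList_filter, hws,
        PySem.List.dedup_eq_ofList]
  -- B side: items via keys + final values
  set dB := ws.foldl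
      (fun (d : PySem.Dict String Int) c =>
        d.insert (String.singleton c) ((PySem.Str.count arr (String.singleton c) : Int)))
      PySem.Dict.empty with hdB
  have hkeys : dB.keys = ws.map String.singleton := by
    rw [hdB, PySem.Dict.keys_foldl_insert_key]
    have : PySem.Set.update (PySem.Dict.empty : PySem.Dict String Int).keys (ws.map String.singleton)
        = PySem.Set.ofList (ws.map String.singleton) := by
      simp [PySem.Set.update, PySem.Set.ofList_eq_foldl]
    rw [this, PySem.Set.ofList_eq_self_of_nodup _ hwsnodup]
  have hnodup : dB.keys.Nodup := by rw [hkeys]; exact hwsnodup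
  rw [PySem.Dict.items_eq_map_keys dB hnodup 0, hkeys, hsets]
  apply List.map_congr_left
  intro k hk
  obtain ⟨c, hc, rfl⟩ := List.mem_map.1 hk
  have hgd : dB.getD (String.singleton c) 0 = (PySem.Str.count arr (String.singleton c) : Int) := by
    rw [hdB, getD_fold_keyval]
    simp [hc]
  have hcq : q c = false := by
    have := (List.mem_filter.1 (hws ▸ hc)).2
    simpa using this
  have hcount : PySem.Str.count arr (String.singleton c) = zs.count c.toString := by
    have h1 : PySem.Str.count arr (String.singleton c) = xs.count c := by
      simp only [PySem.Str.count]
      have hsl : (String.singleton c).toList = [c] := by simp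
      rw [hsl, count_singleton, hxs]
    have h2 : zs.count (String.singleton c) = ys.count c := by
      rw [hzs]; exact List.count_map_of_injective ys String.singleton singleton_injective c
    have h3 : ys.count c = xs.count c := by
      rw [hys]
      exact List.count_filter (by simp [hcq])
    rw [← h2] at h3
    rw [h1, ← h3]
    rfl
  rw [hgd, hcount]
  rfl
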